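-- pv_equiv track=rewrite | github.com/sheryloe/BloggerGent | apps/api/app/services/platform/platform_service.py | _humanize_channel_label
-- ===== SOURCE A (Python) =====
-- def _humanize_channel_label(value: str | None) -> str:
--     raw = str(value or "").strip()
--     if not raw:
--         return ""
--     parts = [part for part in raw.replace("_", "-").split("-") if part]
--     if not parts:
--         return ""
--     return " ".join(part[:1].upper() + part[1:] for part in parts)
-- ===== SOURCE B (Python) =====
-- def _humanize_channel_label(value):
--     raw = str(value or "").strip()
--     out = []
--     new_word = True
--     for c in raw:
--         if c == "-" or c == "_":
--             new_word = True
--         elif new_word: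
--             if out:
--                 out.append(" ")
--             out.append(c.upper())
--             new_word = False
--         else:
--             out.append(c)
--     return "".join(out)
-- ===== Notes on version B (the rewrite author's own statement) =====
-- stated objective: alternative
-- what changed: Replaced the replace/split/filter/capitalize/join pipeline with a single stateful character scan that emits separators' following chars uppercased and inserts spaces on word boundaries.
import Mathlib
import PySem

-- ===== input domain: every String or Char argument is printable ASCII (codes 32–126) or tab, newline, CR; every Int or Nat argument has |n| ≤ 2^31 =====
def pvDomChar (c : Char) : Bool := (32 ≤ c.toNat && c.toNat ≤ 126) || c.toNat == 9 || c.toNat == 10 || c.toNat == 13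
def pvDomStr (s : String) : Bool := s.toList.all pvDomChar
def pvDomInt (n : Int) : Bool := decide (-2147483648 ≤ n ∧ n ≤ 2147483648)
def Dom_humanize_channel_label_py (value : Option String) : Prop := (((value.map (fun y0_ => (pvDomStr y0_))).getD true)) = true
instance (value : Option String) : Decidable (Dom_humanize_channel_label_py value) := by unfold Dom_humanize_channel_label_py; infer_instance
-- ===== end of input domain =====

-- B replaces A's replace/split/filter/capitalize/join pipeline with a single stateful
-- character scan over the stripped string (objective: alternative, same cost).

-- ===== PORT A =====
def humanize_channel_label_py (value : Option String) : String :=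
  let raw := PySem.Chars.strip (value.getD "").toList   -- str(value or "").strip()
  if raw.isEmpty then ""
  else
    let parts := (PySem.Chars.splitOn (PySem.Chars.replace raw ['_'] ['-']) ['-']).filter
      (fun p => !p.isEmpty)
    if parts.isEmpty then ""
    else String.ofList (PySem.Chars.join [' '] (parts.map (fun p =>
      PySem.Chars.upper (PySem.Chars.slice p (some 0) (some 1)) ++ PySem.Chars.slice p (some 1) none)))

-- ===== PORT B =====
-- one step of Source B's for-loop; state = (out, new_word)
def pvScanStep (st : List Char × Bool) (c : Char) : List Char × Bool :=
  if c == '-' || c == '_' then (st.1, true)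
  else if st.2 then
    ((if st.1.isEmpty then st.1 else st.1 ++ [' ']) ++ [PySem.Chars.upperChar c], false)
  else (st.1 ++ [c], false)

def humanize_channel_label_py_alt (value : Option String) : String :=
  let raw := PySem.Chars.strip (value.getD "").toList   -- str(value or "").strip()
  String.ofList (raw.foldl pvScanStep ([], true)).1

-- ===== PRECONDITION & SPEC =====
def Spec_humanize_channel_label_py (value : Option String) (out : String) : Prop := out = humanize_channel_label_py_alt value
instance (value : Option String) (out : String) : Decidable (Spec_humanize_channel_label_py value out) := by unfold Spec_humanize_channel_label_py; infer_instance

-- ===== CLAIM (what is proved, stated in full; the proofs are below) =====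
def Claim_equal_humanize_channel_label_py : Prop := ∀ (value : Option String), Dom_humanize_channel_label_py value → Spec_humanize_channel_label_py value (humanize_channel_label_py value)

-- ===== LEMMAS AND PROOFS =====

-- '_' → '-' on one character
def pvRepl (c : Char) : Char := if c == '_' then '-' else c

-- hand-rolled structural splitter on '-' (head part, tail parts)
def pvSplit1 : List Char → List Char × List (List Char)
  | [] => ([], [])
  | c :: r => if c == '-' then ([], (pvSplit1 r).1 :: (pvSplit1 r).2)
              else (c :: (pvSplit1 r).1, (pvSplit1 r).2)

-- structural splitter on both separators at once
def pvSplit : List Char → List Char × List (List Char)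
  | [] => ([], [])
  | c :: r => if c == '-' || c == '_' then ([], (pvSplit r).1 :: (pvSplit r).2)
              else (c :: (pvSplit r).1, (pvSplit r).2)

-- capitalize-first-char, in take/drop form
def pvCap (p : List Char) : List Char := (p.take 1).map PySem.Chars.upperChar ++ p.tail

-- A's value on a stripped char list
def pvG (cs : List Char) : List Char :=
  PySem.Chars.join [' ']
    (((((pvSplit cs).1 :: (pvSplit cs).2).filter (fun p => !p.isEmpty)).map pvCap))

-- B's scanner tail when a word is in progress (out known nonempty)
def pvW : List Char → List Char
  | [] => []
  | c :: r => if c == '-' || c == '_' then (if (pvG r).isEmpty then [] else ' ' :: pvG r)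
              else c :: pvW r

theorem pv_go_repl (l : List Char) : ∀ (fuel : Nat) (acc : List Char), l.length ≤ fuel →
    PySem.Chars.replace.go ['_'] ['-'] fuel l acc = acc.reverse ++ l.map pvRepl := by
  induction l with
  | nil =>
    intro fuel acc h
    cases fuel <;> simp [PySem.Chars.replace.go]
  | cons c rest ih =>
    intro fuel acc h
    cases fuel with
    | zero => simp at h
    | succ n =>
      rw [PySem.Chars.replace.go]
      by_cases hc : c = '_'
      · simp [hc, List.isPrefixOf, ih n _ (by simpa using h), pvRepl]
      · simp [List.isPrefixOf, hc, ih n _ (by simpa using h), pvRepl]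
        exact fun h' => absurd h'.symm hc

theorem pv_replace_eq (cs : List Char) :
    PySem.Chars.replace cs ['_'] ['-'] = cs.map pvRepl := by
  rw [PySem.Chars.replace]
  simp [pv_go_repl cs cs.length [] le_rfl]

theorem pv_go_split (l : List Char) : ∀ (fuel : Nat) (cur : List Char) (acc : List (List Char)),
    l.length ≤ fuel →
    PySem.Chars.splitOn.go ['-'] fuel l cur acc
      = acc.reverse ++ ((cur.reverse ++ (pvSplit1 l).1) :: (pvSplit1 l).2) := by
  induction l with
  | nil =>
    intro fuel cur acc h
    cases fuel <;> simp [PySem.Chars.splitOn.go, pvSplit1]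
  | cons c rest ih =>
    intro fuel cur acc h
    cases fuel with
    | zero => simp at h
    | succ n =>
      rw [PySem.Chars.splitOn.go]
      by_cases hc : c = '-'
      · simp [hc, List.isPrefixOf, ih n _ _ (by simpa using h), pvSplit1]
      · simp [List.isPrefixOf, hc, pvSplit1]
        rw [if_neg (fun h' => absurd h'.symm hc), ih n _ _ (by simpa using h)]
        simp

theorem pv_splitOn_eq (ds : List Char) :
    PySem.Chars.splitOn ds ['-'] = (pvSplit1 ds).1 :: (pvSplit1 ds).2 := by
  rw [PySem.Chars.splitOn]
  simp [pv_go_split ds (ds.length + 1) [] [] (by omega)]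

theorem pv_split1_map_repl (cs : List Char) : pvSplit1 (cs.map pvRepl) = pvSplit cs := by
  induction cs with
  | nil => rfl
  | cons c r ih =>
    by_cases h1 : c = '-'
    · simp [pvRepl, pvSplit1, pvSplit, h1, ih]
    · by_cases h2 : c = '_'
      · simp [pvRepl, pvSplit1, pvSplit, h2, ih]
      · simp [pvRepl, pvSplit1, pvSplit, h1, h2, ih]

-- A's per-part expression is pvCap
theorem pv_cap_eq (p : List Char) :
    PySem.Chars.upper (PySem.Chars.slice p (some 0) (some 1)) ++ PySem.Chars.slice p (some 1) none
      = pvCap p := by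
  have h1 : PySem.List.slice p none (some (1 : Int)) = p.take 1 := by
    rw [PySem.List.slice_to p (by norm_num)]; rfl
  have h2 : PySem.List.slice p (some (1 : Int)) none = p.tail := PySem.List.slice_from_one p
  simp [PySem.Chars.slice_eq_listSlice, PySem.List.slice_zero_start, h1, h2,
    PySem.Chars.upper, pvCap]

theorem pv_join_cons (x : List Char) (xs : List (List Char)) :
    PySem.Chars.join [' '] (x :: xs) = x ++ xs.flatMap (fun w => ' ' :: w) := by
  induction xs generalizing x with
  | nil => simp [PySem.Chars.join_singleton]
  | cons y ys ih =>
    rw [PySem.Chars.join_cons_cons, ih y]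
    simp

theorem pv_flat_join (vs : List (List Char)) :
    vs.flatMap (fun w => ' ' :: pvCap w)
      = if vs.isEmpty then [] else ' ' :: PySem.Chars.join [' '] (vs.map pvCap) := by
  cases vs with
  | nil => simp
  | cons w ws =>
    simp only [List.flatMap_cons, List.isEmpty_cons, List.map_cons]
    rw [pv_join_cons]
    simp [List.flatMap_map]

theorem pv_G_isEmpty (r : List Char) :
    (pvG r).isEmpty = (((pvSplit r).1 :: (pvSplit r).2).filter (fun p => !p.isEmpty)).isEmpty := by
  cases hf : ((pvSplit r).1 :: (pvSplit r).2).filter (fun p => !p.isEmpty) with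
  | nil => simp [pvG, hf, PySem.Chars.join_nil]
  | cons z zs =>
    have hz : (!z.isEmpty) = true := by
      have hmem : z ∈ ((pvSplit r).1 :: (pvSplit r).2).filter (fun p => !p.isEmpty) := by
        rw [hf]; exact List.mem_cons_self
      exact (List.mem_filter.mp hmem).2
    cases z with
    | nil => simp at hz
    | cons a b =>
      simp only [pvG, hf, List.map_cons]
      rw [pv_join_cons]
      simp [pvCap]

theorem pv_W_eq (r : List Char) :
    pvW r = (pvSplit r).1
      ++ (((pvSplit r).2.filter (fun p => !p.isEmpty)).flatMap (fun w => ' ' :: pvCap w)) := by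
  induction r with
  | nil => simp [pvW, pvSplit]
  | cons c r ih =>
    by_cases hs : (c == '-' || c == '_') = true
    · simp only [pvW, pvSplit, hs, if_pos, List.nil_append]
      rw [pv_flat_join, pv_G_isEmpty]
      rfl
    · simp only [pvW, pvSplit, hs, Bool.false_eq_true, if_false]
      simp [ih]

theorem pv_G_sep {c : Char} (hs : (c == '-' || c == '_') = true) (r : List Char) :
    pvG (c :: r) = pvG r := by
  simp [pvG, pvSplit, hs]

theorem pv_G_word {c : Char} (hs : ¬ (c == '-' || c == '_') = true) (r : List Char) :
    pvG (c :: r) = PySem.Chars.upperChar c :: pvW r := by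
  simp only [pvG, pvSplit, hs, if_neg, Bool.not_eq_true] at *
  simp only [pvSplit, hs, Bool.false_eq_true, if_false, List.filter_cons, List.isEmpty_cons,
    Bool.not_false, if_pos, List.map_cons]
  rw [pv_join_cons]
  simp only [pvCap, List.take_succ_cons, List.take_zero, List.map_cons, List.map_nil,
    List.tail_cons]
  rw [pv_W_eq]
  simp [List.flatMap_map]

-- the scanner invariant: both states, out nonempty
theorem pv_scan_main (cs : List Char) :
    (∀ out : List Char, out ≠ [] →
       (cs.foldl pvScanStep (out, true)).1
         = out ++ (if (pvG cs).isEmpty then [] else ' ' :: pvG cs))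
  ∧ (∀ out : List Char, out ≠ [] →
       (cs.foldl pvScanStep (out, false)).1 = out ++ pvW cs) := by
  induction cs with
  | nil =>
    constructor <;> intro out hout <;>
      simp [pvW, pvG, pvSplit, PySem.Chars.join_nil]
  | cons c r ih =>
    constructor
    · intro out hout
      by_cases hs : (c == '-' || c == '_') = true
      · simp only [List.foldl_cons, pvScanStep, hs, if_pos]
        rw [(ih.1) out hout, pv_G_sep hs]
      · rw [Bool.not_eq_true] at hs
        have hne : out.isEmpty = false := by
          cases out with | nil => exact absurd rfl hout | cons _ _ => rfl
        simp only [List.foldl_cons, pvScanStep, hs, hne, Bool.false_eq_true, if_false, if_true]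
        rw [(ih.2) ((out ++ [' ']) ++ [PySem.Chars.upperChar c]) (by simp)]
        rw [pv_G_word (by simp [hs]) r]
        simp
    · intro out hout
      by_cases hs : (c == '-' || c == '_') = true
      · simp only [List.foldl_cons, pvScanStep, hs, if_pos]
        rw [(ih.1) out hout]
        simp [pvW, hs]
      · rw [Bool.not_eq_true] at hs
        simp only [List.foldl_cons, pvScanStep, hs, Bool.false_eq_true, if_false]
        rw [(ih.2) (out ++ [c]) (by simp)]
        simp [pvW, hs]

theorem pv_scan_eq_G (cs : List Char) :
    (cs.foldl pvScanStep ([], true)).1 = pvG cs := by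
  induction cs with
  | nil => simp [pvG, pvSplit, PySem.Chars.join_nil]
  | cons c r ih =>
    by_cases hs : (c == '-' || c == '_') = true
    · simp only [List.foldl_cons, pvScanStep, hs, if_pos]
      rw [ih, pv_G_sep hs]
    · rw [Bool.not_eq_true] at hs
      simp only [List.foldl_cons, pvScanStep, hs, Bool.false_eq_true, if_false,
        List.isEmpty_nil, if_true, List.nil_append]
      rw [(pv_scan_main r).2 [PySem.Chars.upperChar c] (by simp)]
      rw [pv_G_word (by simp [hs]) r]
      rfl

-- ===== VERDICT (by name: the statement is the Claim_ definition above) =====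
theorem humanize_channel_label_py_spec : Claim_equal_humanize_channel_label_py := by
  intro value _
  unfold Spec_humanize_channel_label_py humanize_channel_label_py humanize_channel_label_py_alt
  dsimp only
  generalize PySem.Chars.strip (value.getD "").toList = cs
  rw [pv_scan_eq_G]
  by_cases h0 : cs.isEmpty
  · have hnil : cs = [] := by simpa using h0
    simp [hnil, pvG, pvSplit, PySem.Chars.join_nil]
  · rw [Bool.not_eq_true] at h0
    simp only [h0, Bool.false_eq_true, if_false]
    rw [pv_replace_eq, pv_splitOn_eq, pv_split1_map_repl]
    by_cases hp : (((pvSplit cs).1 :: (pvSplit cs).2).filter (fun p => !p.isEmpty)).isEmpty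
    · have hnil : ((pvSplit cs).1 :: (pvSplit cs).2).filter (fun p => !p.isEmpty) = [] := by
        simpa using hp
      simp [pvG, hnil, PySem.Chars.join_nil]
    · rw [Bool.not_eq_true] at hp
      simp only [hp, Bool.false_eq_true, if_false, pvG]
      congr 1
      congr 1
      exact List.map_congr_left (fun p _ => pv_cap_eq p)
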